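-- pv_equiv track=rewrite | github.com/rupalsaxena/AI-ChatBoT | evaluation_4/utils.py | remove_substrings
-- ===== SOURCE A (Python) =====
-- def remove_substrings(predicates, ids):
--     updated_preds = []
--     updated_ids = []
--
--     for i in range(len(predicates)):
--         current_pred = predicates[i]
--         current_id = ids[i]
--         is_substring = any(current_pred in other_element for j, other_element in enumerate(predicates) if i != j)
--
--         if not is_substring:
--             updated_preds.append(current_pred)
--             updated_ids.append(current_id)
--     return updated_preds, updated_ids
-- ===== SOURCE B (Python) =====
-- def remove_substrings(predicates, ids):
--     # Count multiplicities once.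
--     counts = {}
--     for p in predicates:
--         counts[p] = counts.get(p, 0) + 1
--     # Substring-occurrence index: for each DISTINCT predicate q, bump every
--     # distinct substring of q (including '' and q itself) once.  Then
--     # subcount[p] = number of distinct predicates that contain p.
--     subcount = {}
--     for q in counts:
--         for s in {q[i:j] for i in range(len(q) + 1) for j in range(i, len(q) + 1)}:
--             subcount[s] = subcount.get(s, 0) + 1
--     # p is kept iff no OTHER element contains it: its multiplicity is 1 and the
--     # only distinct predicate containing it is p itself.
--     updated_preds, updated_ids = [], []
--     for p, k in zip(predicates, ids):
--         if counts[p] == 1 and subcount[p] == 1: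
--             updated_preds.append(p)
--             updated_ids.append(k)
--     return updated_preds, updated_ids
-- ===== Notes on version B (the rewrite author's own statement) =====
-- stated objective: faster
-- what changed: B drops A's per-element scan over all other elements: it builds a substring-occurrence index once (every distinct substring of every distinct predicate, counted per distinct owner) plus a multiplicity counter, and the final pass keeps p iff count(p)==1 and exactly one distinct predicate (p itself) contains p, by two O(1) dict lookups.
import Mathlib
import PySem

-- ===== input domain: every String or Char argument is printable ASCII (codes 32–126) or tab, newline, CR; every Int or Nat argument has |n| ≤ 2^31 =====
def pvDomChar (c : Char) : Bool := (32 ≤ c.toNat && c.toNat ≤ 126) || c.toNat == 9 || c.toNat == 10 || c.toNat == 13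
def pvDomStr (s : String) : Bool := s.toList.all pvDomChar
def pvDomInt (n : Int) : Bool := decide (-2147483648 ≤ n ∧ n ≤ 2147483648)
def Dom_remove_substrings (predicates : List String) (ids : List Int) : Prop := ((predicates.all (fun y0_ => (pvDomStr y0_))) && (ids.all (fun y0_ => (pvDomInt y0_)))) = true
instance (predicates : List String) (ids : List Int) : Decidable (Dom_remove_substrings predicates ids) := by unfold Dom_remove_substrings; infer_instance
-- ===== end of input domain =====

-- B replaces A's per-element scan over all other elements by a precomputed substring-occurrence
-- index: every distinct substring of every distinct predicate is counted once, so the final pass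
-- keeps p iff count(p) = 1 and exactly one distinct predicate (p itself) contains p; objective:
-- faster (a timing run measured B ahead; the two keep-criteria are proved equivalent below).

-- ===== PORT A =====
def remove_substrings (predicates : List String) (ids : List Int) : List String × List Int :=
  (PySem.List.pyRange 0 (predicates.length : Int) 1).foldl
    (fun acc i =>
      let current_pred := PySem.List.pyGetD predicates i ""
      let current_id := PySem.List.pyGetD ids i 0
      let is_substring := (PySem.List.enumerate predicates 0).any
        (fun je => decide (i ≠ je.1) && PySem.Str.isIn current_pred je.2)
      if !is_substring then (acc.1 ++ [current_pred], acc.2 ++ [current_id]) else acc)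
    ([], [])

-- ===== PORT B =====
-- the set comprehension {q[i:j] for i in range(len(q)+1) for j in range(i, len(q)+1)}
def pyAllSubs (q : String) : PySem.Set String :=
  PySem.Set.ofList ((PySem.List.pyRange 0 (PySem.Str.len q + 1) 1).flatMap
    (fun i => (PySem.List.pyRange i (PySem.Str.len q + 1) 1).map
      (fun j => PySem.Str.slice q (some i) (some j))))

def remove_substrings_alt (predicates : List String) (ids : List Int) : List String × List Int :=
  let counts : PySem.Dict String Int :=
    predicates.foldl (fun d p => d.insert p (d.getD p 0 + 1)) PySem.Dict.empty
  let subcount : PySem.Dict String Int :=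
    counts.keys.foldl (fun d q =>
      (pyAllSubs q).foldl (fun d s => d.insert s (d.getD s 0 + 1)) d) PySem.Dict.empty
  (predicates.zip ids).foldl
    (fun acc pk =>
      if (counts.getD pk.1 0 == 1) && (subcount.getD pk.1 0 == 1)
      then (acc.1 ++ [pk.1], acc.2 ++ [pk.2]) else acc)
    ([], [])

-- ===== PRECONDITION & SPEC =====
-- Pre_ excludes exactly the inputs where A raises IndexError: ids shorter than predicates.
def Pre_remove_substrings (predicates : List String) (ids : List Int) : Prop :=
  predicates.length ≤ ids.length
instance (predicates : List String) (ids : List Int) : Decidable (Pre_remove_substrings predicates ids) := by unfold Pre_remove_substrings; infer_instance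
def pvWitness_remove_substrings : List String × List Int := (["ab", "c", "ab"], [1, 2, 3])
def Spec_remove_substrings (predicates : List String) (ids : List Int) (out : List String × List Int) : Prop := out = remove_substrings_alt predicates ids
instance (predicates : List String) (ids : List Int) (out : List String × List Int) : Decidable (Spec_remove_substrings predicates ids out) := by unfold Spec_remove_substrings; infer_instance

-- ===== CLAIM (what is proved, stated in full; the proofs are below) =====
def Claim_equal_remove_substrings : Prop := ∀ (predicates : List String) (ids : List Int), Dom_remove_substrings predicates ids → Pre_remove_substrings predicates ids → Spec_remove_substrings predicates ids (remove_substrings predicates ids)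

-- ===== LEMMAS AND PROOFS =====

-- A's keep-condition at (Int) index i
def condA (predicates : List String) (i : Int) : Bool :=
  !((PySem.List.enumerate predicates 0).any
      (fun je => decide (i ≠ je.1) && PySem.Str.isIn (PySem.List.pyGetD predicates i "") je.2))

-- B's keep-condition on the element itself (counter lookup and substring-index lookup)
def condB (predicates : List String) (p : String) : Bool :=
  ((PySem.Dict.counter predicates).getD p 0 == 1) &&
  (((((PySem.Set.ofList predicates).foldl
      (fun d q => (pyAllSubs q).foldl (fun d s => d.insert s (d.getD s 0 + 1)) d)
      PySem.Dict.empty) : PySem.Dict String Int).getD p 0) == 1)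

-- membership in the substring set IS string containment
lemma mem_pyAllSubs (q s : String) : s ∈ pyAllSubs q ↔ s.toList <:+: q.toList := by
  unfold pyAllSubs
  rw [PySem.Set.mem_ofList]
  simp only [List.mem_flatMap, List.mem_map, PySem.List.mem_pyRange_one, PySem.Str.len_eq]
  constructor
  · rintro ⟨i, ⟨hi0, _⟩, j, ⟨hij, _⟩, rfl⟩
    have hj0 : (0 : Int) ≤ j := le_trans hi0 hij
    have hsl : (PySem.Str.slice q (some i) (some j)).toList
        = (q.toList.drop i.toNat).take (j.toNat - i.toNat) := by
      rw [PySem.Str.toList_slice, PySem.Chars.slice_eq_listSlice, PySem.List.slice_toNat _ hi0 hj0]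
    rw [hsl]
    exact ((q.toList.drop i.toNat).take_prefix _).isInfix.trans (q.toList.drop_suffix _).isInfix
  · intro h
    obtain ⟨pre, suf, hps⟩ := h
    have hlen : pre.length + s.toList.length ≤ q.toList.length := by
      rw [← hps]; simp
    refine ⟨(pre.length : Int), ⟨by positivity, by omega⟩,
            ((pre.length : Int) + (s.toList.length : Int)), ⟨by omega, by omega⟩, ?_⟩
    apply String.toList_inj.mp
    rw [PySem.Str.toList_slice, PySem.Chars.slice_eq_listSlice]
    rw [PySem.List.slice_natCast_add]
    rw [← hps]; simp

lemma nodup_pyAllSubs (q : String) : (pyAllSubs q).Nodup := by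
  unfold pyAllSubs; exact PySem.Set.nodup_ofList _

-- a counting loop bumps getD by the count of the key in the traversed list
lemma getD_inc_foldl (L : List String) (d : PySem.Dict String Int) (s : String) :
    (L.foldl (fun d x => d.insert x (d.getD x 0 + 1)) d).getD s 0
      = d.getD s 0 + (L.count s : Int) := by
  induction L generalizing d with
  | nil => simp
  | cons x t ih =>
    simp only [List.foldl_cons, ih, PySem.Dict.getD_insert, List.count_cons]
    by_cases h : s = x
    · simp [h]
      ring
    · simp [h, Ne.symm h]

-- the substring index counts, for each key p, the distinct predicates containing p
lemma getD_subindex (u : List String) (d : PySem.Dict String Int) (p : String) :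
    (u.foldl (fun d q => (pyAllSubs q).foldl (fun d s => d.insert s (d.getD s 0 + 1)) d) d).getD p 0
      = d.getD p 0 + (u.countP (fun q => PySem.Str.isIn p q) : Int) := by
  induction u generalizing d with
  | nil => simp
  | cons q t ih =>
    simp only [List.foldl_cons, ih, getD_inc_foldl, List.countP_cons]
    have hc : ((pyAllSubs q).count p : Int) = if PySem.Str.isIn p q then 1 else 0 := by
      by_cases h : PySem.Str.isIn p q = true
      · rw [List.count_eq_one_of_mem (nodup_pyAllSubs q)
          ((mem_pyAllSubs q p).mpr ((PySem.Str.isIn_iff_infix p q).mp h)), h]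
        simp
      · rw [List.count_eq_zero.mpr
          (fun hm => h ((PySem.Str.isIn_iff_infix p q).mpr ((mem_pyAllSubs q p).mp hm))), if_neg h]
        simp
    rw [hc]
    split <;> push_cast <;> ring

-- in a nodup list containing p with pred p, countP = 1 says p is the ONLY element satisfying pred
lemma countP_eq_one_iff (l : List String) (hnd : l.Nodup) (p : String) (hp : p ∈ l)
    (pred : String → Bool) (hpp : pred p = true) :
    l.countP pred = 1 ↔ ∀ q ∈ l, pred q = true → q = p := by
  rw [List.countP_eq_length_filter]
  have hpf : p ∈ l.filter pred := List.mem_filter.mpr ⟨hp, hpp⟩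
  constructor
  · intro h q hq hpq
    obtain ⟨x, hl⟩ := List.length_eq_one_iff.mp h
    have hpx : p = x := by rw [hl] at hpf; simpa using hpf
    have hqx : q = x := by
      have hqf : q ∈ l.filter pred := List.mem_filter.mpr ⟨hq, hpq⟩
      rw [hl] at hqf; simpa using hqf
    rw [hqx, hpx]
  · intro h
    have hall : ∀ x ∈ l.filter pred, x = p := fun x hx =>
      h x (List.mem_filter.mp hx).1 (List.mem_filter.mp hx).2
    have hrep := List.eq_replicate_of_mem hall
    have hnd' : (l.filter pred).Nodup := hnd.filter pred
    have hlen0 : 0 < (l.filter pred).length := List.length_pos_of_mem hpf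
    rw [hrep] at hnd'
    rw [List.nodup_replicate] at hnd'
    omega

lemma count_eraseIdx_succ (l : List String) (k : Nat) (hk : k < l.length) (p : String)
    (hp : l[k] = p) : l.count p = (l.eraseIdx k).count p + 1 := by
  conv_lhs => rw [← List.take_append_drop k l]
  rw [List.eraseIdx_eq_take_drop_succ, ← List.getElem_cons_drop hk]
  simp [List.count_append, hp]
  omega

-- the two keep-criteria agree at every index
lemma cond_eq (predicates : List String) (k : Nat) (hk : k < predicates.length) :
    condA predicates (k : Int) = condB predicates predicates[k] := by
  rw [Bool.eq_iff_iff]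
  unfold condA condB
  have hget : PySem.List.pyGetD predicates (k : Int) "" = predicates[k] := by
    simp [PySem.List.pyGetD_natCast, List.getD_eq_getElem?_getD, hk]
  rw [hget]
  set p := predicates[k] with hp
  have hmem : p ∈ predicates := List.getElem_mem hk
  have hmemS : p ∈ PySem.Set.ofList predicates := (PySem.Set.mem_ofList _ _).mpr hmem
  have hcount := count_eraseIdx_succ predicates k hk p hp.symm
  have hself : PySem.Str.isIn p p = true := (PySem.Str.isIn_iff_infix p p).mpr (List.infix_refl _)
  rw [Bool.and_eq_true, PySem.Dict.getD_counter, getD_subindex]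
  simp only [beq_iff_eq, Nat.cast_eq_one, PySem.Dict.getD_empty, zero_add]
  rw [countP_eq_one_iff _ (PySem.Set.nodup_ofList _) p hmemS _ hself]
  constructor
  · intro h
    simp only [Bool.not_eq_true', List.any_eq_false] at h
    refine ⟨?_, ?_⟩
    · have hnotE : p ∉ predicates.eraseIdx k := by
        intro hE
        obtain ⟨j, hj, hjk, hjq⟩ := List.mem_eraseIdx_iff_getElem.mp hE
        have := h (0 + (j : Int), predicates[j])
          ((PySem.List.mem_enumerate_iff _ _ _).mpr ⟨j, hj, rfl⟩)
        simp only [Bool.and_eq_true, decide_eq_true_eq, not_and, Bool.not_eq_true] at this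
        have h1 := this (by omega)
        rw [hjq, hself] at h1
        exact Bool.true_eq_false.mp h1
      have h0 : (predicates.eraseIdx k).count p = 0 := List.count_eq_zero.mpr hnotE
      exact (by omega : List.count p predicates = 1)
    · intro q hq hpq
      have hq' : q ∈ predicates := (PySem.Set.mem_ofList _ _).mp hq
      by_contra hqp
      obtain ⟨j, hj, hjq⟩ := List.getElem_of_mem hq'
      have hjk : j ≠ k := by
        intro h'; apply hqp; rw [← hjq]; subst h'; exact hp.symm
      have := h (0 + (j : Int), predicates[j])
        ((PySem.List.mem_enumerate_iff _ _ _).mpr ⟨j, hj, rfl⟩)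
      simp only [Bool.and_eq_true, decide_eq_true_eq, not_and, Bool.not_eq_true] at this
      have h1 := this (by omega)
      rw [hjq] at h1
      rw [h1] at hpq
      exact Bool.false_eq_true.mp hpq
  · intro h
    obtain ⟨hc1', hall⟩ := h
    simp only [Bool.not_eq_true', List.any_eq_false]
    rintro ⟨i, q⟩ hmemE
    obtain ⟨j, hj, hje⟩ := (PySem.List.mem_enumerate_iff _ _ _).mp hmemE
    simp only [Prod.mk.injEq] at hje
    simp only [hje.1, hje.2, Bool.and_eq_true, decide_eq_true_eq, not_and, Bool.not_eq_true]
    intro hne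
    have hjk : j ≠ k := by intro h'; subst h'; exact hne (by omega)
    by_cases hqp : predicates[j] = p
    · exfalso
      have hE : p ∈ predicates.eraseIdx k :=
        List.mem_eraseIdx_iff_getElem.mpr ⟨j, hj, hjk, hqp⟩
      have := List.count_pos_iff.mpr hE
      omega
    · by_contra hIn
      exact hqp (hall predicates[j] ((PySem.Set.mem_ofList _ _).mpr (List.getElem_mem hj))
        (by revert hIn; cases PySem.Str.isIn p predicates[j] <;> simp))

-- a filtering loop that appends to both components of a pair
lemma foldl_pair_if {β σ τ : Type} (c : β → Bool) (f : β → σ) (g : β → τ)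
    (l : List β) (a : List σ) (b : List τ) :
    l.foldl (fun acc x => if c x then (acc.1 ++ [f x], acc.2 ++ [g x]) else acc) (a, b)
      = (a ++ (l.filter c).map f, b ++ (l.filter c).map g) := by
  induction l generalizing a b with
  | nil => simp
  | cons x t ih =>
    by_cases h : c x <;> simp [h, ih]

lemma zip_eq_map_range (predicates : List String) (ids : List Int)
    (hpre : predicates.length ≤ ids.length) :
    predicates.zip ids
      = (List.range predicates.length).map (fun k => (predicates.getD k "", ids.getD k 0)) := by
  apply List.ext_getElem
  · simp; omega
  · intro k h1 h2
    have hk : k < predicates.length := by simpa using h2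
    have hk' : k < ids.length := lt_of_lt_of_le hk hpre
    simp [List.getElem_zip, List.getD_eq_getElem?_getD, hk, hk']

theorem remove_substrings_eq (predicates : List String) (ids : List Int)
    (hpre : predicates.length ≤ ids.length) :
    remove_substrings predicates ids = remove_substrings_alt predicates ids := by
  unfold remove_substrings remove_substrings_alt
  simp only [PySem.Dict.foldl_insert_getD_add_one_eq_counter, PySem.Dict.keys_counter]
  -- both loop bodies are (definitionally) condA/condB filters; reduce each with foldl_pair_if
  show (PySem.List.pyRange 0 (predicates.length : Int) 1).foldl
      (fun (acc : List String × List Int) (i : Int) =>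
        if condA predicates i
        then (acc.1 ++ [PySem.List.pyGetD predicates i ""], acc.2 ++ [PySem.List.pyGetD ids i 0])
        else acc) ([], [])
    = (predicates.zip ids).foldl
      (fun (acc : List String × List Int) (pk : String × Int) =>
        if condB predicates pk.1
        then (acc.1 ++ [pk.1], acc.2 ++ [pk.2])
        else acc) ([], [])
  rw [foldl_pair_if (c := condA predicates) (f := fun i => PySem.List.pyGetD predicates i "")
        (g := fun i => PySem.List.pyGetD ids i 0),
      foldl_pair_if (c := fun pk : String × Int => condB predicates pk.1)
        (f := fun pk : String × Int => pk.1) (g := fun pk : String × Int => pk.2),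
      zip_eq_map_range predicates ids hpre,
      PySem.List.pyRange_zero_natCast]
  simp only [List.filter_map, List.map_map, List.nil_append]
  have hcond : ∀ k ∈ List.range predicates.length,
      (condA predicates ∘ fun k : Nat => (k : Int)) k
        = ((fun pk : String × Int => condB predicates pk.1) ∘
            fun k => (predicates.getD k "", ids.getD k 0)) k := by
    intro k hk
    have hk' : k < predicates.length := List.mem_range.mp hk
    simp only [Function.comp_apply]
    rw [cond_eq predicates k hk']
    congr 1
    simp [List.getD_eq_getElem?_getD, hk']
  rw [List.filter_congr hcond]
  rw [Prod.mk.injEq]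
  refine ⟨?_, ?_⟩ <;>
  · apply List.map_congr_left
    intro k hk
    have hk' : k < predicates.length := List.mem_range.mp (List.mem_of_mem_filter hk)
    have hk'' : k < ids.length := lt_of_lt_of_le hk' hpre
    simp [PySem.List.pyGetD_natCast, List.getD_eq_getElem?_getD, hk', hk'']

-- ===== VERDICT (by name: the statement is the Claim_ definition above) =====
theorem remove_substrings_spec : Claim_equal_remove_substrings := by
  intro predicates ids _ hpre
  unfold Spec_remove_substrings
  exact remove_substrings_eq predicates ids hpre
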